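-- pv_equiv track=rewrite | github.com/ris3abh/demores | code/resume_processor.py | segregate_description_and_title
-- ===== SOURCE A (Python) =====
-- def segregate_description_and_title(section):
--     structured_content = {}
--     current_title = None
--
--     for line in section["content"]:
--         line = line.strip()
--         if not line:
--             continue
--         if len(line.split()) <= 10:
--             current_title = line
--             structured_content[current_title] = []
--         elif current_title:
--             structured_content[current_title].append(line)
--     return structured_content
-- ===== SOURCE B (Python) =====
-- def segregate_description_and_title(section):
--     cleaned = [l for l in (raw.strip() for raw in section["content"]) if l]
--
--     def is_title(line):
--         return len(line.split()) <= 10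
--
--     result = {}
--     start = next((k for k, l in enumerate(cleaned) if is_title(l)), len(cleaned))
--     rest = cleaned[start:]
--     while rest:
--         title, body = rest[0], rest[1:]
--         cut = next((k for k, l in enumerate(body) if is_title(l)), len(body))
--         result[title] = body[:cut]
--         rest = body[cut:]
--     return result
-- ===== Notes on version B (the rewrite author's own statement) =====
-- stated objective: alternative
-- what changed: A's stateful single scan (current-title register with incremental appends into the dict) is replaced by a boundary-finding decomposition: clean the lines once, skip to the first title, then repeatedly slice off one (title, lines-up-to-next-title) segment and assign it whole, so repeated titles overwrite exactly as in A.
import Mathlib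
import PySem

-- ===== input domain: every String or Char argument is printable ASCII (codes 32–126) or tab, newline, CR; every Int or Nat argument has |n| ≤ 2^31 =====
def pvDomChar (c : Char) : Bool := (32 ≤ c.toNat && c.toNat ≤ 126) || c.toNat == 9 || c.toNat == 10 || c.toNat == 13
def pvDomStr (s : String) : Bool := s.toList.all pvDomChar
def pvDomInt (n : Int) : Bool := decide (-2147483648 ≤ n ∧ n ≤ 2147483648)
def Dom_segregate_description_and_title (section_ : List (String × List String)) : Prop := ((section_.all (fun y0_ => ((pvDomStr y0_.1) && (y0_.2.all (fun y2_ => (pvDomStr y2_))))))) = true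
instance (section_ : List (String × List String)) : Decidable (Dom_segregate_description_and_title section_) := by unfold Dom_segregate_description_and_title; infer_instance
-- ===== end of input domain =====

-- B replaces A's stateful single scan (current-title register + incremental appends into the dict)
-- by a boundary-finding decomposition: clean the lines once, then repeatedly slice off one
-- title segment (title, lines up to the next title) and assign it; objective: alternative.

-- ===== PORT A =====
-- loop body of A: line = line.strip(); skip empty; short line -> new title with [];
-- otherwise append to the current title's entry (the key always exists when current_title is set,
-- so d[t].append(x) is exactly Dict.modify t [] (· ++ [x]) here)
def pvStepA (st : PySem.Dict String (List String) × Option String) (raw : String) :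
    PySem.Dict String (List String) × Option String :=
  let line := PySem.Str.strip raw
  if line = "" then st
  else if (PySem.Str.split₀ line).length ≤ 10 then (st.1.insert line [], some line)
  else
    match st.2 with
    | some t => (st.1.modify t [] (· ++ [line]), st.2)
    | none => st

def segregate_description_and_title (section_ : List (String × List String)) : List (String × List String) :=
  match (PySem.Dict.mk section_).get? "content" with
  | none => []   -- Python raises KeyError here; excluded by Pre_
  | some content => ((content.foldl pvStepA (PySem.Dict.empty, none)).1).items

-- ===== PORT B =====
def pvIsTitle (line : String) : Bool := (PySem.Str.split₀ line).length ≤ 10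

-- while rest: title, body = rest[0], rest[1:]; cut = first title index in body (len(body) if none,
-- which is exactly List.findIdx); result[title] = body[:cut]; rest = body[cut:].
-- body[:cut] / body[cut:] with the natural index cut are List.take / List.drop
-- (exact: PySem.List.slice_to_natCast / slice_from_natCast).
def pvBLoop (result : PySem.Dict String (List String)) (rest : List String) :
    PySem.Dict String (List String) :=
  match rest with
  | [] => result
  | title :: body =>
    let cut := body.findIdx pvIsTitle
    pvBLoop (result.insert title (body.take cut)) (body.drop cut)
termination_by rest.length
decreasing_by simp

def segregate_description_and_title_alt (section_ : List (String × List String)) : List (String × List String) :=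
  match (PySem.Dict.mk section_).get? "content" with
  | none => []   -- Python raises KeyError here; excluded by Pre_
  | some content =>
    let cleaned := (content.map PySem.Str.strip).filter (fun l => l != "")
    let start := cleaned.findIdx pvIsTitle
    (pvBLoop PySem.Dict.empty (cleaned.drop start)).items

-- ===== PRECONDITION & SPEC =====
-- Pre_ excludes exactly the inputs without a "content" key, on which A raises KeyError.
def Pre_segregate_description_and_title (section_ : List (String × List String)) : Prop :=
  ((PySem.Dict.mk section_).get? "content").isSome = true
instance (section_ : List (String × List String)) : Decidable (Pre_segregate_description_and_title section_) := by unfold Pre_segregate_description_and_title; infer_instance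

def pvWitness_segregate_description_and_title : (List (String × List String)) :=
  [("content", ["My Title", "this is a description line with more than ten words in it ok", "  "])]

def Spec_segregate_description_and_title (section_ : List (String × List String)) (out : List (String × List String)) : Prop := out = segregate_description_and_title_alt section_
instance (section_ : List (String × List String)) (out : List (String × List String)) : Decidable (Spec_segregate_description_and_title section_ out) := by unfold Spec_segregate_description_and_title; infer_instance

-- ===== CLAIM (what is proved, stated in full; the proofs are below) =====
def Claim_equal_segregate_description_and_title : Prop := ∀ (section_ : List (String × List String)), Dom_segregate_description_and_title section_ → Pre_segregate_description_and_title section_ → Spec_segregate_description_and_title section_ (segregate_description_and_title section_)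

-- ===== LEMMAS AND PROOFS =====

-- A's loop body on an already-stripped non-empty line (strip is applied before the line reaches it)
def pvStepC (st : PySem.Dict String (List String) × Option String) (line : String) :
    PySem.Dict String (List String) × Option String :=
  if (PySem.Str.split₀ line).length ≤ 10 then (st.1.insert line [], some line)
  else
    match st.2 with
    | some t => (st.1.modify t [] (· ++ [line]), st.2)
    | none => st

lemma pvBLoop_nil (d : PySem.Dict String (List String)) : pvBLoop d [] = d := by
  rw [pvBLoop]

lemma pvBLoop_cons (d : PySem.Dict String (List String)) (x : String) (xs : List String) :
    pvBLoop d (x :: xs) =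
      pvBLoop (d.insert x (xs.take (xs.findIdx pvIsTitle))) (xs.drop (xs.findIdx pvIsTitle)) := by
  rw [pvBLoop.eq_def]

lemma pvFoldA_eq_foldC (content : List String) :
    ∀ st, content.foldl pvStepA st =
      ((content.map PySem.Str.strip).filter (fun l => l != "")).foldl pvStepC st := by
  induction content with
  | nil => intro st; rfl
  | cons r rest ih =>
    intro st
    by_cases h : PySem.Str.strip r = ""
    · simp [pvStepA, h, ih]
    · have hstep : pvStepA st r = pvStepC st (PySem.Str.strip r) := by
        unfold pvStepA pvStepC; exact if_neg h
      have hb : (PySem.Str.strip r != "") = true := by simp [h]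
      rw [List.foldl_cons, hstep, ih, List.map_cons, List.filter_cons, if_pos hb,
        List.foldl_cons]

lemma pvModify_insert (d : PySem.Dict String (List String)) (t : String)
    (acc : List String) (f : List String → List String) :
    (d.insert t acc).modify t [] f = d.insert t (f acc) := by
  simp [PySem.Dict.modify, PySem.Dict.getD_insert_self, PySem.Dict.insert_insert_self]

lemma pvFoldC_some (cs : List String) :
    ∀ (d : PySem.Dict String (List String)) (t : String) (acc : List String),
      (cs.foldl pvStepC (d.insert t acc, some t)).1 =
        pvBLoop (d.insert t (acc ++ cs.take (cs.findIdx pvIsTitle)))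
          (cs.drop (cs.findIdx pvIsTitle)) := by
  induction cs with
  | nil => intro d t acc; simp [pvBLoop_nil]
  | cons x xs ih =>
    intro d t acc
    by_cases hx : (PySem.Str.split₀ x).length ≤ 10
    · have hfi : List.findIdx pvIsTitle (x :: xs) = 0 := by
        simp [List.findIdx_cons, pvIsTitle, hx]
      rw [hfi]
      simp only [List.foldl_cons, pvStepC, if_pos hx]
      rw [ih (d.insert t acc) x []]
      rw [List.take_zero, List.drop_zero, List.append_nil, pvBLoop_cons]
      simp
    · have hfi : List.findIdx pvIsTitle (x :: xs) = List.findIdx pvIsTitle xs + 1 := by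
        simp [List.findIdx_cons, pvIsTitle, hx]
      rw [hfi]
      simp only [List.foldl_cons, pvStepC, if_neg hx]
      rw [pvModify_insert, ih d t (acc ++ [x])]
      simp [List.take_succ_cons, List.drop_succ_cons, List.append_assoc]

lemma pvFoldC_none (cs : List String) :
    ∀ (d : PySem.Dict String (List String)),
      (cs.foldl pvStepC (d, none)).1 = pvBLoop d (cs.drop (cs.findIdx pvIsTitle)) := by
  induction cs with
  | nil => intro d; simp [pvBLoop_nil]
  | cons x xs ih =>
    intro d
    by_cases hx : (PySem.Str.split₀ x).length ≤ 10
    · have hfi : List.findIdx pvIsTitle (x :: xs) = 0 := by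
        simp [List.findIdx_cons, pvIsTitle, hx]
      rw [hfi]
      simp only [List.foldl_cons, pvStepC, if_pos hx]
      rw [pvFoldC_some xs d x [], List.drop_zero, pvBLoop_cons]
      simp
    · have hfi : List.findIdx pvIsTitle (x :: xs) = List.findIdx pvIsTitle xs + 1 := by
        simp [List.findIdx_cons, pvIsTitle, hx]
      rw [hfi]
      simp only [List.foldl_cons, pvStepC, if_neg hx, List.drop_succ_cons]
      exact ih d

-- ===== VERDICT (by name: the statement is the Claim_ definition above) =====
theorem segregate_description_and_title_spec : Claim_equal_segregate_description_and_title := by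
  intro section_ _ hpre
  unfold Spec_segregate_description_and_title
  unfold segregate_description_and_title segregate_description_and_title_alt
  cases hc : (PySem.Dict.mk section_).get? "content" with
  | none => rfl
  | some content =>
    simp only []
    rw [pvFoldA_eq_foldC, pvFoldC_none]
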